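-- pv_equiv track=rewrite | github.com/jpalaciosd/salud-digital | lambda-dr-nova/lambda_function.py | quitar_bloque_agendar_cita
-- ===== SOURCE A (Python) =====
-- def quitar_bloque_agendar_cita(texto: str) -> str:
--     """Elimina [AGENDAR_CITA] y las líneas key=value (incluye medicold) del mensaje al usuario."""
--     lines = texto.splitlines()
--     out = []
--     in_block = False
--     for line in lines:
--         if "[AGENDAR_CITA]" in line:
--             in_block = True
--             continue
--         if in_block and "=" in line:
--             key = line.strip().split("=")[0].strip().lower()
--             if key in ("medicoid", "medicold", "mediconombre", "especialidad", "fecha", "hora", "tipo", "motivo", "notas"):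
--                 continue
--         if in_block and line.strip() == "":
--             in_block = False
--         if not in_block:
--             out.append(line)
--     return "\n".join(out).strip()
-- ===== SOURCE B (Python) =====
-- def quitar_bloque_agendar_cita(texto: str) -> str:
--     """Elimina [AGENDAR_CITA] y las líneas key=value (incluye medicold) del mensaje al usuario."""
--     lines = texto.splitlines()
--     out = []
--     i = 0
--     n = len(lines)
--     while i < n:
--         if "[AGENDAR_CITA]" in lines[i]:
--             # skip the whole block up to (but not including) its blank terminator
--             i += 1
--             while i < n and lines[i].strip() != "":
--                 i += 1
--             if i < n:
--                 out.append(lines[i])  # keep the blank terminator verbatim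
--                 i += 1
--             continue
--         out.append(lines[i])
--         i += 1
--     return "\n".join(out).strip()
-- ===== Notes on version B (the rewrite author's own statement) =====
-- stated objective: simpler
-- what changed: B replaces A's boolean in_block state flag and the (provably redundant) key=value whitelist test with an index scan that, on seeing an [AGENDAR_CITA] line, consumes the whole block in an inner skip loop up to its blank terminator; the key-splitting and whitelist lookup disappear entirely.
import Mathlib
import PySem

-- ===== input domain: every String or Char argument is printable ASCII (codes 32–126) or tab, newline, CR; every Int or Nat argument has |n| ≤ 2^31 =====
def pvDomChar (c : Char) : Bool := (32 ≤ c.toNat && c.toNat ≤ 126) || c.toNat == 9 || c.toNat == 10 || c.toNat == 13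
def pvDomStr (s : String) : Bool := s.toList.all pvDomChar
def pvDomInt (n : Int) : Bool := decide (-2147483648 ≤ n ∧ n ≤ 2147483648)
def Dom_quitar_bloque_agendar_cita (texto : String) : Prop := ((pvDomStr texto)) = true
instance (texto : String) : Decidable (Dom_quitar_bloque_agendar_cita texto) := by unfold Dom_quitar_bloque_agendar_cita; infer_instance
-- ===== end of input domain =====

-- B drops A's in_block flag and its redundant key whitelist: it skips each [AGENDAR_CITA]
-- block wholesale with an inner loop up to the blank terminator (objective: simpler).

-- ===== PORT A =====
def pvWhitelistA : List String :=
  ["medicoid", "medicold", "mediconombre", "especialidad", "fecha", "hora", "tipo", "motivo", "notas"]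

-- the trailing part of A's loop body (after the whitelist 'continue' did not fire)
def pvStepRestA (out : List String) (inb : Bool) (line : String) : List String × Bool :=
  let inb' := if inb && (PySem.Str.strip line == "") then false else inb
  if !inb' then (out ++ [line], inb') else (out, inb')

def pvStepA (st : List String × Bool) (line : String) : List String × Bool :=
  if PySem.Str.isIn "[AGENDAR_CITA]" line then (st.1, true)
  else if st.2 && PySem.Str.isIn "=" line then
    -- line.strip().split("=")[0]: split with a nonempty sep never returns none/[], so
    -- .getD []/.headD "" are exact here (Python's [0] cannot raise)
    let key := PySem.Str.lower (PySem.Str.strip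
      (((PySem.Str.split? (PySem.Str.strip line) "=").getD []).headD ""))
    if pvWhitelistA.contains key then (st.1, st.2)
    else pvStepRestA st.1 st.2 line
  else pvStepRestA st.1 st.2 line

def quitar_bloque_agendar_cita (texto : String) : String :=
  PySem.Str.strip (PySem.Str.join "\n"
    (((PySem.Str.splitlines texto).foldl pvStepA ([], false)).1))

-- ===== PORT B =====
-- the two while loops of Source B, as mutual recursion over the suffix of lines at index i
mutual
  def pvScanB : List String → List String
    | [] => []
    | l :: ls =>
      if PySem.Str.isIn "[AGENDAR_CITA]" l then pvSkipB ls
      else l :: pvScanB ls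
  def pvSkipB : List String → List String
    | [] => []
    | l :: ls =>
      if PySem.Str.strip l == "" then l :: pvScanB ls  -- keep the blank terminator
      else pvSkipB ls
end

def quitar_bloque_agendar_cita_alt (texto : String) : String :=
  PySem.Str.strip (PySem.Str.join "\n" (pvScanB (PySem.Str.splitlines texto)))

-- ===== PRECONDITION & SPEC =====
def Spec_quitar_bloque_agendar_cita (texto : String) (out : String) : Prop := out = quitar_bloque_agendar_cita_alt texto
instance (texto : String) (out : String) : Decidable (Spec_quitar_bloque_agendar_cita texto out) := by unfold Spec_quitar_bloque_agendar_cita; infer_instance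

-- ===== CLAIM (what is proved, stated in full; the proofs are below) =====
def Claim_equal_quitar_bloque_agendar_cita : Prop := ∀ (texto : String), Dom_quitar_bloque_agendar_cita texto → Spec_quitar_bloque_agendar_cita texto (quitar_bloque_agendar_cita texto)

-- ===== LEMMAS AND PROOFS =====

-- a string whose strip is empty consists of whitespace only
lemma pv_strip_eq_nil_all_space (cs : List Char) (h : PySem.Chars.strip cs = []) :
    ∀ c ∈ cs, PySem.Chars.isspace c = true := by
  intro c hc
  simp only [PySem.Chars.strip, PySem.Chars.rstrip, PySem.Chars.lstrip] at h
  rw [List.reverse_eq_nil_iff, List.dropWhile_eq_nil_iff] at h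
  rw [← List.takeWhile_append_dropWhile (p := PySem.Chars.isspace) (l := cs)] at hc
  rcases List.mem_append.mp hc with h1 | h1
  · exact List.mem_takeWhile_imp h1
  · exact h c (by simpa using h1)

-- if a substring containing a non-space char occurs in s, s.strip() is nonempty
lemma pv_isIn_strip_ne (sub s : String) (c : Char)
    (hin : PySem.Str.isIn sub s = true) (hc : c ∈ sub.toList)
    (hsp : PySem.Chars.isspace c = false) :
    (PySem.Str.strip s == "") = false := by
  rw [PySem.Str.isIn_iff_infix] at hin
  have hmem : c ∈ s.toList := hin.mem hc
  by_contra hne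
  have heq : PySem.Str.strip s = "" := eq_of_beq (Bool.not_eq_false _ |>.mp hne)
  have h2 : PySem.Chars.strip s.toList = [] := by
    have := congrArg String.toList heq
    simpa [PySem.Str.toList_strip] using this
  have := pv_strip_eq_nil_all_space s.toList h2 c hmem
  simp [hsp] at this

-- core loop equivalence: A's fold with state (out, in_block) ≡ B's two mutual loops
lemma pv_loop_equiv (ls : List String) : ∀ (out : List String) (b : Bool),
    (ls.foldl pvStepA (out, b)).1 = out ++ (if b then pvSkipB ls else pvScanB ls) := by
  induction ls with
  | nil => intro out b; cases b <;> simp [pvScanB, pvSkipB]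
  | cons l ls ih =>
    intro out b
    by_cases hag : PySem.Str.isIn "[AGENDAR_CITA]" l = true
    · have hstrip : (PySem.Str.strip l == "") = false :=
        pv_isIn_strip_ne _ _ '[' hag (by decide) (by decide)
      cases b <;>
        simp only [List.foldl_cons, pvStepA, hag, if_true, pvScanB, pvSkipB, hstrip,
          Bool.false_eq_true, if_false, ih]
    · have hag' : PySem.Str.isIn "[AGENDAR_CITA]" l = false := by
        simpa using hag
      cases b with
      | false =>
        simp only [List.foldl_cons, pvStepA, hag', Bool.false_eq_true, if_false,
          Bool.false_and, pvStepRestA, Bool.not_false, if_true, pvScanB, ih]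
        simp
      | true =>
        by_cases hbl : (PySem.Str.strip l == "") = true
        · have heq : PySem.Str.isIn "=" l = false := by
            by_contra h
            have := pv_isIn_strip_ne "=" l '=' (by simpa using h) (by decide) (by decide)
            rw [this] at hbl; exact Bool.false_ne_true hbl
          simp only [List.foldl_cons, pvStepA, hag', Bool.false_eq_true, if_false,
            heq, Bool.and_false, pvStepRestA, hbl, Bool.and_true, if_true,
            Bool.not_false, pvSkipB, ih]
          simp
        · have hbl' : (PySem.Str.strip l == "") = false := by simpa using hbl
          simp only [List.foldl_cons, pvStepA, hag', Bool.false_eq_true, if_false,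
            Bool.true_and, pvStepRestA, hbl', Bool.and_false, Bool.not_true,
            pvSkipB, ih, if_true]
          by_cases hEq : PySem.Str.isIn "=" l = true
          · simp only [hEq, if_true]
            by_cases hwl : pvWhitelistA.contains (PySem.Str.lower (PySem.Str.strip
                (((PySem.Str.split? (PySem.Str.strip l) "=").getD []).headD ""))) = true
            · simp only [hwl, if_true]
            · simp only [hwl, Bool.false_eq_true, if_false]
              simp
          · simp only [hEq, Bool.false_eq_true, if_false]
            simp

-- ===== VERDICT (by name: the statement is the Claim_ definition above) =====
theorem quitar_bloque_agendar_cita_spec : Claim_equal_quitar_bloque_agendar_cita := by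
  intro texto _
  unfold Spec_quitar_bloque_agendar_cita quitar_bloque_agendar_cita quitar_bloque_agendar_cita_alt
  rw [pv_loop_equiv]
  simp
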